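-- pv_equiv track=rewrite | github.com/ChristopherG19/UVG_HBase_Simulation | ddl/functions.py | dropTable
-- ===== SOURCE A (Python) =====
-- def get_info(command):
--     try:
--         infoValues = command.split(" ", 1)[1]
--     except:
--         return (None, "Sintaxis inválida: Argumentos faltantes")
--     dataInfo = infoValues.split(",", 1)
--     TableName = dataInfo[0].replace("'", "").replace('"', '')
--     return (TableName, dataInfo)
--
-- def get_table(Hfiles, command):
--     Table = None
--     TableName = get_info(command)[0]
--     if(TableName == None):
--         return Table
--
--     for region in Hfiles:
--         for table in Hfiles[region]:
--             if table == TableName: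
--                 Table = Hfiles[region]
--
--     return Table
--
-- def exists(Hfiles, command):
--     exist = False
--     if (get_table(Hfiles, command) != None):
--         exist = True
--     return exist
--
-- def checkStatus(Hfiles, command):
--     if(not exists(Hfiles, command)):
--         return "Table not found, no changes"
--
--     TableName = get_info(command)[0]
--     if(TableName == None):
--         return (get_info(command)[1], TableName)
--
--     isEnabled = False
--
--     for region in Hfiles:
--         for table in Hfiles[region]:
--             if(TableName == table):
--                 if "enabled" in Hfiles[region][table]:
--                     if (Hfiles[region][table]["enabled"] == "True"):
--                         return (not isEnabled, TableName)
--                     else: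
--                         return (isEnabled, TableName)
--
--     return (isEnabled, TableName)
--
-- def dropTable(Hfiles, command):
--     TableName, CommandInfo = get_info(command)
--
--     if(TableName == None):
--         return (CommandInfo, Hfiles, None)
--
--     if(not exists(Hfiles, command)):
--         return (f"Table {TableName} not found, no changes", Hfiles, TableName)
--
--     veri, res = checkStatus(Hfiles, command)
--
--     if(not veri == False):
--         return (f"{TableName} is not disabled, not changes", Hfiles, TableName)
--
--     for region in Hfiles:
--         for table in Hfiles[region]:
--             if TableName == table:
--                 del Hfiles[region]
--                 return (f"{TableName} dropped", Hfiles, TableName)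
-- ===== SOURCE B (Python) =====
-- def get_info(command):
--     try:
--         infoValues = command.split(" ", 1)[1]
--     except:
--         return (None, "Sintaxis inválida: Argumentos faltantes")
--     dataInfo = infoValues.split(",", 1)
--     TableName = dataInfo[0].replace("'", "").replace('"', '')
--     return (TableName, dataInfo)
--
-- def dropTable(Hfiles, command):
--     TableName, CommandInfo = get_info(command)
--
--     if TableName is None:
--         return (CommandInfo, Hfiles, None)
--
--     first_region = None
--     for region in Hfiles:
--         tables = Hfiles[region]
--         if TableName in tables:
--             if first_region is None:
--                 first_region = region
--             attrs = tables[TableName]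
--             if "enabled" in attrs:
--                 if attrs["enabled"] == "True":
--                     return (f"{TableName} is not disabled, not changes", Hfiles, TableName)
--                 break
--
--     if first_region is None:
--         return (f"Table {TableName} not found, no changes", Hfiles, TableName)
--
--     del Hfiles[first_region]
--     return (f"{TableName} dropped", Hfiles, TableName)
-- ===== Notes on version B (the rewrite author's own statement) =====
-- stated objective: simpler
-- what changed: A's chain of exists/get_table/checkStatus plus a final deletion loop rescans all regions three to four times; B keeps get_info and then walks the regions once, remembering the first region containing the table and deciding enabled/drop/not-found in that single pass.
import Mathlib
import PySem

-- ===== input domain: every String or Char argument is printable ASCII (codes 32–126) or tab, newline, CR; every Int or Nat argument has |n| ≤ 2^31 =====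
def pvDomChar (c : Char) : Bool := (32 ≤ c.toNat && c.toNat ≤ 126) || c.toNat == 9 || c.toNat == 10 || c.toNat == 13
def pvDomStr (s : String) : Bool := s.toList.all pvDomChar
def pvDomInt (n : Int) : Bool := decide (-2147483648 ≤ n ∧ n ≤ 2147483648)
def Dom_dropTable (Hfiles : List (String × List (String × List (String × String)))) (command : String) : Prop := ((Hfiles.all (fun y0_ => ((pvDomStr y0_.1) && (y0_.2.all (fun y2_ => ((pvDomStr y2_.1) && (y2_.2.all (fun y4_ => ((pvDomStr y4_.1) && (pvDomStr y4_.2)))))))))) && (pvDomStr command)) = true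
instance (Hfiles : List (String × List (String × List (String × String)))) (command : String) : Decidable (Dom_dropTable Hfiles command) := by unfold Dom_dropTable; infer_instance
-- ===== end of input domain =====

-- B replaces A's repeated full scans (exists / checkStatus / final delete loop) by ONE walk over the
-- regions with an early exit; return-value equivalence is proved (both Pythons also mutate Hfiles
-- identically via 'del Hfiles[region]'; the in-place mutation itself is outside the proved statement).

-- ===== PORT A =====
-- shared helper: get_info (identical source in Source A and Source B); none = the except-branch (no " " in command)
def getInfo (command : String) : Option (String × List String) :=
  match PySem.Str.splitMax? command " " 1 with
  | none => none        -- unreachable: separator " " is nonempty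
  | some parts =>
    match parts[1]? with
    | none => none      -- IndexError caught by 'except': returns (None, "Sintaxis inválida: Argumentos faltantes")
    | some infoValues =>
      let dataInfo := (PySem.Str.splitMax? infoValues "," 1).getD []   -- separator "," nonempty, always some
      some (PySem.Str.replace (PySem.Str.replace (dataInfo.headD "") "'" "") "\"" "", dataInfo)

-- get_table: nested for-loops keeping the LAST matching region's table dict
def getTable (Hfiles : List (String × List (String × List (String × String)))) (command : String) :
    Option (List (String × List (String × String))) :=
  match getInfo command with
  | none => none
  | some (tn, _) =>
    (Hfiles.map (·.1)).foldl (fun tbl region =>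
      let tables := (PySem.Dict.mk Hfiles).getD region []
      (tables.map (·.1)).foldl (fun t table => if table == tn then some tables else t) tbl) none

-- exists: get_table(...) != None
def pyExists (Hfiles : List (String × List (String × List (String × String)))) (command : String) : Bool :=
  (getTable Hfiles command).isSome

-- checkStatus inner loop over one region's table keys; none = fell through (no return)
def csTables (tn : String) (tables : List (String × List (String × String))) (tkeys : List String) : Option Bool :=
  match tkeys with
  | [] => none
  | table :: rest =>
    if table == tn then
      let attrs := (PySem.Dict.mk tables).getD table []
      if (PySem.Dict.mk attrs).contains "enabled" then
        some ((PySem.Dict.mk attrs).getD "enabled" "" == "True")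
      else csTables tn tables rest
    else csTables tn tables rest

-- checkStatus outer loop over regions; an inner 'return' propagates out of both loops
def csRegions (Hfiles : List (String × List (String × List (String × String)))) (tn : String)
    (regions : List String) : Option Bool :=
  match regions with
  | [] => none
  | region :: rest =>
    let tables := (PySem.Dict.mk Hfiles).getD region []
    match csTables tn tables (tables.map (·.1)) with
    | some b => some b
    | none => csRegions Hfiles tn rest

-- checkStatus, restricted to the pair-returning paths dropTable can reach; the first two branches
-- return a non-pair in Python (a string / (list, None)) and are unreachable from dropTable, which
-- only calls checkStatus after 'exists' succeeded (which also forces TableName ≠ None)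
def checkStatus (Hfiles : List (String × List (String × List (String × String)))) (command : String) :
    Bool × Option String :=
  if !(pyExists Hfiles command) then (true, none)
  else match getInfo command with
  | none => (true, none)
  | some (tn, _) =>
    match csRegions Hfiles tn (Hfiles.map (·.1)) with
    | some b => (b, some tn)
    | none => (false, some tn)

-- final loop of dropTable: first region whose table keys contain TableName is deleted; none = Python's
-- implicit 'return None' after the loop (unreachable: dropTable reaches the loop only when exists holds)
def dropRegions (Hfiles : List (String × List (String × List (String × String)))) (tn : String)
    (regions : List String) :
    Option (String × (List (String × List (String × List (String × String)))) × Option String) :=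
  match regions with
  | [] => none
  | region :: rest =>
    let tables := (PySem.Dict.mk Hfiles).getD region []
    if (tables.map (·.1)).any (fun table => table == tn) then
      some (tn ++ " dropped", ((PySem.Dict.mk Hfiles).erase region).items, some tn)
    else dropRegions Hfiles tn rest

def dropTable (Hfiles : List (String × List (String × List (String × String)))) (command : String) :
    String × (List (String × List (String × List (String × String)))) × Option String :=
  match getInfo command with
  | none => ("Sintaxis inválida: Argumentos faltantes", Hfiles, none)
  | some (tn, _) =>
    if !(pyExists Hfiles command) then ("Table " ++ tn ++ " not found, no changes", Hfiles, some tn)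
    else
      match checkStatus Hfiles command with
      | (veri, _res) =>
        if veri then (tn ++ " is not disabled, not changes", Hfiles, some tn)
        else (dropRegions Hfiles tn (Hfiles.map (·.1))).getD ("", Hfiles, none)

-- ===== PORT B =====
-- the single region walk: carries first_region; Sum.inr () = early 'not disabled' return,
-- Sum.inl fr = loop left (by break or exhaustion) with first_region = fr
def altLoop (Hfiles : List (String × List (String × List (String × String)))) (tn : String)
    (regions : List String) (firstRegion : Option String) : Option String ⊕ Unit :=
  match regions with
  | [] => Sum.inl firstRegion
  | region :: rest =>
    let tables := (PySem.Dict.mk Hfiles).getD region []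
    if (PySem.Dict.mk tables).contains tn then
      let firstRegion' := if firstRegion.isNone then some region else firstRegion
      let attrs := (PySem.Dict.mk tables).getD tn []
      if (PySem.Dict.mk attrs).contains "enabled" then
        if (PySem.Dict.mk attrs).getD "enabled" "" == "True" then Sum.inr ()
        else Sum.inl firstRegion'          -- break
      else altLoop Hfiles tn rest firstRegion'
    else altLoop Hfiles tn rest firstRegion

def dropTable_alt (Hfiles : List (String × List (String × List (String × String)))) (command : String) :
    String × (List (String × List (String × List (String × String)))) × Option String :=
  match getInfo command with
  | none => ("Sintaxis inválida: Argumentos faltantes", Hfiles, none)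
  | some (tn, _) =>
    match altLoop Hfiles tn (Hfiles.map (·.1)) none with
    | Sum.inr _ => (tn ++ " is not disabled, not changes", Hfiles, some tn)
    | Sum.inl none => ("Table " ++ tn ++ " not found, no changes", Hfiles, some tn)
    | Sum.inl (some r) => (tn ++ " dropped", ((PySem.Dict.mk Hfiles).erase r).items, some tn)

-- ===== PRECONDITION & SPEC =====
def Spec_dropTable (Hfiles : List (String × List (String × List (String × String)))) (command : String) (out : String × (List (String × List (String × List (String × String)))) × Option String) : Prop := out = dropTable_alt Hfiles command
instance (Hfiles : List (String × List (String × List (String × String)))) (command : String) (out : String × (List (String × List (String × List (String × String)))) × Option String) : Decidable (Spec_dropTable Hfiles command out) := by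
  unfold Spec_dropTable
  haveI : DecidableEq (List (String × List (String × List (String × String)))) :=
    @instDecidableEqList _ (@instDecidableEqProd _ _ instDecidableEqString (@instDecidableEqList _ inferInstance))
  infer_instance

-- ===== CLAIM (what is proved, stated in full; the proofs are below) =====
def Claim_equal_dropTable : Prop := ∀ (Hfiles : List (String × List (String × List (String × String)))) (command : String), Dom_dropTable Hfiles command → Spec_dropTable Hfiles command (dropTable Hfiles command)

-- ===== LEMMAS AND PROOFS =====

-- region r contains a table named tn
def regMatch (Hfiles : List (String × List (String × List (String × String)))) (tn : String) (r : String) : Bool :=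
  ((((PySem.Dict.mk Hfiles).getD r []).map (·.1)).any (fun t => t == tn))

-- the verdict checkStatus would take from region r: some b = it returns (b, tn) there, none = it scans on
def regVerdict (Hfiles : List (String × List (String × List (String × String)))) (tn : String) (r : String) : Option Bool :=
  let tables := (PySem.Dict.mk Hfiles).getD r []
  let attrs := (PySem.Dict.mk tables).getD tn []
  if (tables.map (·.1)).any (fun t => t == tn) && (PySem.Dict.mk attrs).contains "enabled"
  then some ((PySem.Dict.mk attrs).getD "enabled" "" == "True") else none

theorem contains_mk_eq_any {ν : Type} (l : List (String × ν)) (k : String) :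
    (PySem.Dict.mk l).contains k = (l.map (·.1)).any (fun t => t == k) := by
  simp only [PySem.Dict.contains, List.any_map]; rfl

theorem altLoop_eq (Hfiles : List (String × List (String × List (String × String)))) (tn : String)
    (regions : List String) (fr : Option String) :
    altLoop Hfiles tn regions fr =
      (if regions.findSome? (regVerdict Hfiles tn) = some true then Sum.inr ()
       else Sum.inl (fr.or (regions.find? (regMatch Hfiles tn)))) := by
  induction regions generalizing fr with
  | nil => simp [altLoop]
  | cons r rest ih =>
    simp only [altLoop, contains_mk_eq_any, List.findSome?_cons, List.find?_cons, regVerdict, regMatch]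
    by_cases hm : ((((PySem.Dict.mk Hfiles).getD r []).map (·.1)).any (fun t => t == tn)) = true
    · simp only [hm, Bool.true_and, if_true]
      by_cases he : ((((PySem.Dict.mk ((PySem.Dict.mk Hfiles).getD r [])).getD tn []).map (·.1)).any (fun t => t == "enabled")) = true
      · by_cases hv : ((PySem.Dict.mk ((PySem.Dict.mk ((PySem.Dict.mk Hfiles).getD r [])).getD tn [])).getD "enabled" "" == "True") = true
        · simp [he, hv]
        · simp only [he, hv, Bool.false_eq_true, if_false]
          cases fr <;> simp
      · simp only [he, Bool.false_eq_true, if_false]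
        rw [ih]
        by_cases hs : List.findSome? (regVerdict Hfiles tn) rest = some true
        · simp [hs]
        · simp only [hs, if_false, Sum.inl.injEq]
          cases fr <;> simp
    · simp only [hm, Bool.false_and, Bool.false_eq_true, if_false]
      rw [ih]

theorem inner_fold_eq (tn : String) (tbls : List (String × List (String × String)))
    (l : List String) (acc : Option (List (String × List (String × String)))) :
    l.foldl (fun t table => if table == tn then some tbls else t) acc
      = if l.any (fun x => x == tn) then some tbls else acc := by
  induction l generalizing acc with
  | nil => simp
  | cons x rest ih =>
    simp only [List.foldl_cons, List.any_cons, ih]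
    by_cases h : x == tn <;> simp [h]

theorem outer_fold_isSome (Hfiles : List (String × List (String × List (String × String))))
    (tn : String) (l : List String)
    (acc : Option (List (String × List (String × String)))) :
    (l.foldl (fun tbl region =>
        let tables := (PySem.Dict.mk Hfiles).getD region []
        (tables.map (·.1)).foldl (fun t table => if table == tn then some tables else t) tbl) acc).isSome
      = (acc.isSome || l.any (regMatch Hfiles tn)) := by
  induction l generalizing acc with
  | nil => simp
  | cons r rest ih =>
    simp only [List.foldl_cons]
    rw [ih, inner_fold_eq, List.any_cons]
    by_cases hm : regMatch Hfiles tn r = true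
    · have hm' : ((((PySem.Dict.mk Hfiles).getD r []).map (fun x => x.1)).any (fun x => x == tn)) = true := hm
      rw [hm', hm]
      simp
    · have hm' : ((((PySem.Dict.mk Hfiles).getD r []).map (fun x => x.1)).any (fun x => x == tn)) = false := by
        rw [Bool.not_eq_true] at hm; exact hm
      have hm2 : regMatch Hfiles tn r = false := hm'
      rw [hm', hm2]
      simp

theorem pyExists_eq (Hfiles : List (String × List (String × List (String × String))))
    (command : String) (tn : String) (di : List String) (h : getInfo command = some (tn, di)) :
    pyExists Hfiles command = (Hfiles.map (·.1)).any (regMatch Hfiles tn) := by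
  unfold pyExists getTable
  rw [h]
  rw [outer_fold_isSome]
  rfl

theorem csTables_eq (tn : String) (tables : List (String × List (String × String))) (tkeys : List String) :
    csTables tn tables tkeys =
      (if tkeys.any (fun t => t == tn) && (PySem.Dict.mk ((PySem.Dict.mk tables).getD tn [])).contains "enabled"
       then some ((PySem.Dict.mk ((PySem.Dict.mk tables).getD tn [])).getD "enabled" "" == "True") else none) := by
  induction tkeys with
  | nil => simp [csTables]
  | cons t rest ih =>
    simp only [csTables, List.any_cons]
    by_cases ht : (t == tn) = true
    · have : t = tn := by simpa using ht
      subst this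
      simp only [ht, Bool.true_or, Bool.true_and]
      by_cases he : (PySem.Dict.mk ((PySem.Dict.mk tables).getD t [])).contains "enabled" = true
      · simp [he]
      · simp [he, ih]
    · simp only [ht, Bool.false_or]
      rw [if_neg (by simp)]
      exact ih

theorem csRegions_eq (Hfiles : List (String × List (String × List (String × String)))) (tn : String)
    (regions : List String) :
    csRegions Hfiles tn regions = regions.findSome? (regVerdict Hfiles tn) := by
  induction regions with
  | nil => simp [csRegions]
  | cons r rest ih =>
    have hv : csTables tn ((PySem.Dict.mk Hfiles).getD r []) (((PySem.Dict.mk Hfiles).getD r []).map (·.1))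
        = regVerdict Hfiles tn r := by
      rw [csTables_eq]; rfl
    simp only [csRegions, List.findSome?_cons, hv, ih]
    cases regVerdict Hfiles tn r <;> rfl

theorem dropRegions_eq (Hfiles : List (String × List (String × List (String × String)))) (tn : String)
    (regions : List String) :
    dropRegions Hfiles tn regions =
      (regions.find? (regMatch Hfiles tn)).map
        (fun r => (tn ++ " dropped", ((PySem.Dict.mk Hfiles).erase r).items, some tn)) := by
  induction regions with
  | nil => simp [dropRegions]
  | cons r rest ih =>
    simp only [dropRegions, List.find?_cons]
    by_cases hm : regMatch Hfiles tn r = true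
    · have hm' : ((((PySem.Dict.mk Hfiles).getD r []).map (fun x => x.1)).any (fun table => table == tn)) = true := hm
      rw [hm', hm]
      simp
    · have hm2 : regMatch Hfiles tn r = false := by rw [Bool.not_eq_true] at hm; exact hm
      have hm' : ((((PySem.Dict.mk Hfiles).getD r []).map (fun x => x.1)).any (fun table => table == tn)) = false := hm2
      rw [hm', hm2]
      simp [ih]

theorem regVerdict_ne_none (Hfiles : List (String × List (String × List (String × String))))
    (tn : String) (r : String) (h : regVerdict Hfiles tn r ≠ none) : regMatch Hfiles tn r = true := by
  by_cases hm : regMatch Hfiles tn r = true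
  · exact hm
  · exfalso
    apply h
    simp only [regMatch] at hm
    simp [regVerdict, hm]

theorem checkStatus_eq (Hfiles : List (String × List (String × List (String × String))))
    (command : String) (tn : String) (di : List String) (h : getInfo command = some (tn, di))
    (hex : (Hfiles.map (·.1)).any (regMatch Hfiles tn) = true) :
    checkStatus Hfiles command = (((Hfiles.map (·.1)).findSome? (regVerdict Hfiles tn)).getD false, some tn) := by
  unfold checkStatus
  rw [pyExists_eq Hfiles command tn di h, hex, h]
  simp only [Bool.not_true, Bool.false_eq_true, if_false, csRegions_eq]
  cases (Hfiles.map (·.1)).findSome? (regVerdict Hfiles tn) <;> rfl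

-- ===== VERDICT (by name: the statement is the Claim_ definition above) =====
theorem dropTable_spec : Claim_equal_dropTable := by
  intro Hfiles command _
  unfold Spec_dropTable dropTable dropTable_alt
  cases hgi : getInfo command with
  | none => rfl
  | some p =>
    obtain ⟨tn, di⟩ := p
    dsimp only
    rw [altLoop_eq]
    by_cases hex : (Hfiles.map (·.1)).any (regMatch Hfiles tn) = true
    · rw [pyExists_eq Hfiles command tn di hgi, hex]
      rw [checkStatus_eq Hfiles command tn di hgi hex]
      by_cases ht : (Hfiles.map (·.1)).findSome? (regVerdict Hfiles tn) = some true
      · rw [ht]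
        simp
      · have hv : ((Hfiles.map (·.1)).findSome? (regVerdict Hfiles tn)).getD false = false := by
          cases hfs : (Hfiles.map (·.1)).findSome? (regVerdict Hfiles tn) with
          | none => rfl
          | some b => cases b with
            | false => rfl
            | true => exact absurd hfs ht
        rw [hv, dropRegions_eq]
        obtain ⟨r0, hr0⟩ : ∃ r0, List.find? (regMatch Hfiles tn) (Hfiles.map (·.1)) = some r0 := by
          rw [← Option.isSome_iff_exists, List.find?_isSome]
          simpa using hex
        rw [hr0, if_neg ht]
        simp
    · have hex' : (Hfiles.map (·.1)).any (regMatch Hfiles tn) = false := by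
        rwa [Bool.not_eq_true] at hex
      rw [pyExists_eq Hfiles command tn di hgi, hex']
      have hall : ∀ x ∈ Hfiles.map (·.1), regMatch Hfiles tn x = false := by
        intro x hx
        cases hb : regMatch Hfiles tn x with
        | false => rfl
        | true =>
          have : (Hfiles.map (·.1)).any (regMatch Hfiles tn) = true :=
            List.any_eq_true.mpr ⟨x, hx, hb⟩
          rw [hex'] at this
          exact absurd this (by simp)
      have h1 : List.findSome? (regVerdict Hfiles tn) (Hfiles.map (·.1)) = none := by
        apply List.findSome?_eq_none_iff.mpr
        intro x hx
        by_contra hne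
        have := regVerdict_ne_none Hfiles tn x hne
        rw [hall x hx] at this
        exact absurd this (by simp)
      have h2 : List.find? (regMatch Hfiles tn) (Hfiles.map (·.1)) = none := by
        apply List.find?_eq_none.mpr
        intro x hx
        simp [hall x hx]
      rw [h1, h2]
      simp
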